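/- GENERATED by mk_final_copies.py from the proof of the farm's unit `decode_residue.1b` (farm:decode_residue.1b.1: Proof.lean) as the
   re-elaboration sweep compiled it — do not edit. -/
import Vorbis.Spec.Units.decode_residue_1b
import Vorbis.Spec.Worked.decode_residue_1b_Lemmas

open X86 X86.User Asan Vorbis Vorbis.Spec Vorbis.Spec.DecodeResidue

/-- Unit `decode_residue.1b`: from `ret1` (0x10ec95, `At1b`) to `ret8` (0x10ed48, `At1c`): the residue lookup, `actual_size`,
`limit_r_begin`, `limit_r_end`, `n_read`. Four walks of Lemmas.lean composed by `ReachVia.trans`; each ends at the return of a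
check call, so the paths of `je` / `cmova` / `cmova` are merged two by two. -/
theorem Vorbis.Spec.Worked.decode_residue_1b_ok : Vorbis.Spec.decode_residue_1b.Statement := by
  intro Lay hLay μ hμ u₀ hcode hld8 hld2 hld1 hld4
  intro g hent v hat
  refine (Vorbis.Spec.decode_residue_1b.lookup_walk hLay hμ hcode hld8 hld2 hld1 hld4 g hent v hat).trans ?_
  intro vq hq
  refine (Vorbis.Spec.decode_residue_1b.actual_walk hLay hμ hcode hld4 g hent vq hq).trans ?_
  intro va hva
  refine (Vorbis.Spec.decode_residue_1b.begin_walk hLay hμ hcode hld4 g hent va hva).trans ?_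
  intro vb hvb
  exact Vorbis.Spec.decode_residue_1b.end_walk hLay hμ hcode hld4 g hent vb hvb
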